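-- pv_equiv track=rewrite | github.com/sangffdd/python | nguyễn xuân sang _1813020007_12mmc/bt3.py | tinh_tong
-- ===== SOURCE A (Python) =====
-- def tinh_tong(u):
--     tong = 0
--     for s in range (1,u+1):
--         if (s == 13 ):
--             break
--         else:
--             tong += s
--
--     return tong
-- ===== SOURCE B (Python) =====
-- def tinh_tong(u):
--     n = max(0, min(u, 12))
--     return n * (n + 1) // 2
-- ===== Notes on version B (the rewrite author's own statement) =====
-- stated objective: simpler
-- what changed: Replaces the accumulate-and-break loop over range(1, u+1) by the closed-form triangular number of the capped bound max(0, min(u, 12)).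
import Mathlib
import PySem

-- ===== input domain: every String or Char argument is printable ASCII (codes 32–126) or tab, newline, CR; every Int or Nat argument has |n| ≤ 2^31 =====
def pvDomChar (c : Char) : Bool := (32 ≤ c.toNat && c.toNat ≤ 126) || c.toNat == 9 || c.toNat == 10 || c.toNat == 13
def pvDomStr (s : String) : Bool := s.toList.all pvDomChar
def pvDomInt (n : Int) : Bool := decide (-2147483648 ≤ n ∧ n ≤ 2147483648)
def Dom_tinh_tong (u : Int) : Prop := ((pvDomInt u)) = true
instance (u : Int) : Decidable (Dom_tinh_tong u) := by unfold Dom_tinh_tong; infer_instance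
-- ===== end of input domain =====

-- B replaces A's 1..u loop with an early break at 13 by the closed-form
-- triangular number of the capped bound min(u,12); return values agree on all ints.

-- ===== PORT A =====
-- for-loop 'for s in range(1, u+1)' with 'break' at s == 13, accumulating tong;
-- the range iterator is the counter s running up to the stop bound u+1
def tinhTongFor (s stop tong : Int) : Int :=
  if s < stop then
    if s == 13 then tong else tinhTongFor (s + 1) stop (tong + s)
  else tong
termination_by (stop - s).toNat
decreasing_by omega

def tinh_tong (u : Int) : Int :=
  tinhTongFor 1 (u + 1) 0

-- ===== PORT B =====
def tinh_tong_alt (u : Int) : Int :=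
  PySem.Int.floordiv (max 0 (min u 12) * (max 0 (min u 12) + 1)) 2

-- ===== PRECONDITION & SPEC =====
def Spec_tinh_tong (u : Int) (out : Int) : Prop := out = tinh_tong_alt u
instance (u : Int) (out : Int) : Decidable (Spec_tinh_tong u out) := by unfold Spec_tinh_tong; infer_instance

-- ===== CLAIM (what is proved, stated in full; the proofs are below) =====
def Claim_equal_tinh_tong : Prop := ∀ (u : Int), Dom_tinh_tong u → Spec_tinh_tong u (tinh_tong u)

-- ===== LEMMAS AND PROOFS =====

-- list view of A's loop, used only in the proofs
def tinhTongLoopA : List Int → Int → Int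
  | [], tong => tong
  | s :: rest, tong => if s == 13 then tong else tinhTongLoopA rest (tong + s)

-- the counter loop equals the list loop over the materialised range
theorem tinhTongFor_eq_loopA (stop : Int) (n : Nat) :
    ∀ (s t : Int), (stop - s).toNat = n →
      tinhTongFor s stop t = tinhTongLoopA (PySem.List.pyRange s stop 1) t := by
  induction n with
  | zero =>
    intro s t hn
    rw [tinhTongFor, if_neg (by omega), PySem.List.pyRange_one]
    have h0 : (stop - s).toNat = 0 := hn
    rw [h0]
    simp [tinhTongLoopA]
  | succ k ih =>
    intro s t hn
    rw [tinhTongFor, if_pos (by omega), PySem.List.pyRange_one_cons (by omega)]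
    by_cases hs : s = 13
    · simp [tinhTongLoopA, hs]
    · simp only [tinhTongLoopA, beq_iff_eq, if_neg hs]
      exact ih (s + 1) (t + s) (by omega)

-- if the loop never meets 13, it just adds the whole list
theorem tinhTongLoopA_no13 (l : List Int) (t : Int) (h : (13 : Int) ∉ l) :
    tinhTongLoopA l t = t + l.sum := by
  induction l generalizing t with
  | nil => simp [tinhTongLoopA]
  | cons x xs ih =>
    have hx : x ≠ 13 := fun he => h (by simp [he])
    have hxs : (13 : Int) ∉ xs := fun hm => h (List.mem_cons_of_mem _ hm)
    simp only [tinhTongLoopA, beq_iff_eq, if_neg hx, ih _ hxs, List.sum_cons]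
    ring

-- once 13 is in the first part, the tail never matters
theorem tinhTongLoopA_stop (l1 l2 : List Int) (t : Int) (h : (13 : Int) ∈ l1) :
    tinhTongLoopA (l1 ++ l2) t = tinhTongLoopA l1 t := by
  induction l1 generalizing t with
  | nil => simp at h
  | cons x xs ih =>
    by_cases hx : x = 13
    · simp [tinhTongLoopA, hx]
    · have hm : (13 : Int) ∈ xs := by
        rcases List.mem_cons.mp h with h1 | h1
        · exact absurd h1.symm hx
        · exact h1
      simp [tinhTongLoopA, hx, ih _ hm]

theorem sum_range_map (m : Nat) :
    ((List.range m).map (fun k : Nat => (1 : Int) + (k : Int))).sum = ((m * (m + 1) / 2 : Nat) : Int) := by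
  induction m with
  | zero => simp
  | succ n ih =>
    rw [List.range_succ, List.map_append, List.sum_append, ih]
    simp only [List.map_cons, List.map_nil, List.sum_cons, List.sum_nil]
    have hx : (n + 1) * (n + 1 + 1) = n * (n + 1) + 2 * (n + 1) := by ring
    have h1 : (n * (n + 1)) % 2 = 0 := Nat.even_mul_succ_self n |>.two_dvd |> Nat.mod_eq_zero_of_dvd
    omega

-- ===== VERDICT (by name: the statement is the Claim_ definition above) =====
theorem tinh_tong_spec : Claim_equal_tinh_tong := by
  intro u _
  unfold Spec_tinh_tong tinh_tong tinh_tong_alt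
  rw [tinhTongFor_eq_loopA (u + 1) (u + 1 - 1).toNat 1 0 rfl, PySem.List.pyRange_one]
  by_cases hu : u ≤ 12
  · -- no break: the whole range is summed
    by_cases hpos : 0 < u
    · have hn : max 0 (min u 12) = u := by omega
      have hmem : (13 : Int) ∉ (List.range (u + 1 - 1).toNat).map (fun k : Nat => (1 : Int) + (k : Int)) := by
        intro hm
        simp only [List.mem_map, List.mem_range] at hm
        obtain ⟨k, hk, he⟩ := hm
        omega
      rw [tinhTongLoopA_no13 _ _ hmem, sum_range_map]
      rw [hn, PySem.Int.floordiv_eq_ediv_of_pos (by omega)]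
      have hcast : (((u + 1 - 1).toNat : Nat) : Int) = u := by omega
      have hprod : (((u + 1 - 1).toNat * ((u + 1 - 1).toNat + 1) : Nat) : Int) = u * (u + 1) := by
        push_cast [hcast]
        ring
      have heven : ((u + 1 - 1).toNat * ((u + 1 - 1).toNat + 1)) % 2 = 0 :=
        (Nat.even_mul_succ_self _).two_dvd |> Nat.mod_eq_zero_of_dvd
      omega
    · have h0 : (u + 1 - 1).toNat = 0 := by omega
      have hn : max 0 (min u 12) = 0 := by omega
      rw [h0, hn]
      simp [tinhTongLoopA, PySem.Int.floordiv]
  · -- u ≥ 13: break at 13, result 78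
    have hm : (u + 1 - 1).toNat = 13 + ((u + 1 - 1).toNat - 13) := by omega
    rw [hm, List.range_add, List.map_append,
        tinhTongLoopA_stop _ _ _ (by decide)]
    have hn : max 0 (min u 12) = 12 := by omega
    rw [hn]
    decide
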